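-- pv_equiv track=rewrite | github.com/RenissonSilva/coral-island-ws | script.py | find_by_labels
-- ===== SOURCE A (Python) =====
-- from typing import List, Optional, Set, Tuple
--
-- def find_by_labels(text: str, dictionary: List[str]) -> Set[str]:
--     found: Set[str] = set()
--     low = text.lower()
--     for w in dictionary:
--         if w in low:
--             # Title case, special cases
--             if w == "autumn":
--                 found.add("Fall")
--             elif w == "all seasons":
--                 found.add("All Seasons")
--             elif w == "year round":
--                 found.add("Year Round")
--             else:
--                 found.add(w.title())
--     return found
-- ===== SOURCE B (Python) =====
-- from typing import List, Set
--
-- _LABELS = {"autumn": "Fall", "all seasons": "All Seasons", "year round": "Year Round"}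
--
-- def find_by_labels(text: str, dictionary: List[str]) -> Set[str]:
--     low = text.lower()
--     n = len(low)
--     # index: the set of every substring of low whose length occurs in the dictionary
--     lengths = {len(w) for w in dictionary}
--     subs = set()
--     for L in lengths:
--         for i in range(n - L + 1):
--             subs.add(low[i:i + L])
--     found: Set[str] = set()
--     for w in dictionary:
--         if w in subs:
--             found.add(_LABELS.get(w, w.title()))
--     return found
-- ===== Notes on version B (the rewrite author's own statement) =====
-- stated objective: faster
-- what changed: B builds a hash-set index of every substring of the lowered text whose length occurs in the dictionary, then answers each dictionary word by one O(1) set lookup (special-case titles via a lookup table), instead of A's per-word substring scan over the whole text.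
import Mathlib
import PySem

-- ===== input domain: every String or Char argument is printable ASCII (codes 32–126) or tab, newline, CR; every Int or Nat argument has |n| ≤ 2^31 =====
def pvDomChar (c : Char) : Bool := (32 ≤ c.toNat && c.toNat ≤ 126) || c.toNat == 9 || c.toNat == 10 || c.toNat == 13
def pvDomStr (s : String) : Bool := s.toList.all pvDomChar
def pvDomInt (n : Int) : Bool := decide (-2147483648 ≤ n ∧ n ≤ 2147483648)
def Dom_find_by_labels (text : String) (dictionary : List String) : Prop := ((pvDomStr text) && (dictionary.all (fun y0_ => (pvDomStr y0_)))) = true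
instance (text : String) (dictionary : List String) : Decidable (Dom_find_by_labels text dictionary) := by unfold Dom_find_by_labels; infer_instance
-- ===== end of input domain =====

-- B replaces the per-word builtin substring scans of A by a substring index: it collects every
-- substring of the lowered text whose length occurs in the dictionary into one set and answers
-- each dictionary word by a set lookup, mapping matches through a label table (objective: alternative).

-- str.title(), ported by hand (exact on ASCII: 'cased' = alphabetic): uppercase a letter that
-- follows a non-letter, lowercase a letter that follows a letter.
def pvTitleGo : Bool → List Char → List Char
  | _, [] => []
  | prev, c :: rest =>
    if PySem.Chars.isalpha c then
      (if prev then PySem.Chars.lowerChar c else PySem.Chars.upperChar c) :: pvTitleGo true rest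
    else
      c :: pvTitleGo false rest

def pvTitle (s : String) : String := String.ofList (pvTitleGo false s.toList)

-- ===== PORT A =====
def find_by_labels (text : String) (dictionary : List String) : List String :=
  let low := PySem.Str.lower text
  dictionary.foldl (fun found w =>
    if PySem.Str.isIn w low then
      if w == "autumn" then PySem.Set.add found "Fall"
      else if w == "all seasons" then PySem.Set.add found "All Seasons"
      else if w == "year round" then PySem.Set.add found "Year Round"
      else PySem.Set.add found (pvTitle w)
    else found) PySem.Set.empty

-- ===== PORT B =====
def pvLabels : PySem.Dict String String :=
  PySem.Dict.ofList [("autumn", "Fall"), ("all seasons", "All Seasons"), ("year round", "Year Round")]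

def find_by_labels_alt (text : String) (dictionary : List String) : List String :=
  let low := PySem.Str.lower text
  let n : Int := (PySem.Str.len low : Int)
  let lengths : PySem.Set Int := PySem.Set.ofList (dictionary.map (fun w => ((PySem.Str.len w : Int))))
  let subs : PySem.Set String :=
    lengths.foldl (fun s L =>
      (PySem.List.pyRange 0 (n - L + 1) 1).foldl
        (fun s i => PySem.Set.add s (PySem.Str.slice low (some i) (some (i + L)))) s)
      PySem.Set.empty
  dictionary.foldl (fun found w =>
    if PySem.Set.contains subs w then
      PySem.Set.add found (PySem.Dict.getD pvLabels w (pvTitle w))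
    else found) PySem.Set.empty

-- ===== PRECONDITION & SPEC =====
def Spec_find_by_labels (text : String) (dictionary : List String) (out : List String) : Prop := out = find_by_labels_alt text dictionary
instance (text : String) (dictionary : List String) (out : List String) : Decidable (Spec_find_by_labels text dictionary out) := by unfold Spec_find_by_labels; infer_instance

-- ===== CLAIM (what is proved, stated in full; the proofs are below) =====
def Claim_equal_find_by_labels : Prop := ∀ (text : String) (dictionary : List String), Dom_find_by_labels text dictionary → Spec_find_by_labels text dictionary (find_by_labels text dictionary)

-- ===== LEMMAS AND PROOFS =====

-- membership in a fold that only adds elements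
theorem mem_foldl_add {α β : Type} [BEq β] [LawfulBEq β] (f : α → β) (l : List α) (s : List β) (x : β) :
    x ∈ l.foldl (fun s i => PySem.Set.add s (f i)) s ↔ x ∈ s ∨ ∃ i ∈ l, x = f i := by
  induction l generalizing s with
  | nil => simp
  | cons a t ih =>
    simp only [List.foldl_cons, ih, PySem.Set.mem_add, List.mem_cons]
    constructor
    · rintro (( h | h) | ⟨i, hi, rfl⟩)
      · exact Or.inl h
      · exact Or.inr ⟨a, Or.inl rfl, h⟩
      · exact Or.inr ⟨i, Or.inr hi, rfl⟩
    · rintro (h | ⟨i, (rfl | hi), rfl⟩)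
      · exact Or.inl (Or.inl h)
      · exact Or.inl (Or.inr rfl)
      · exact Or.inr ⟨i, hi, rfl⟩

theorem mem_foldl_nested {α β γ : Type} [BEq γ] [LawfulBEq γ]
    (outer : List α) (inner : α → List β) (f : α → β → γ) (s : List γ) (x : γ) :
    x ∈ outer.foldl (fun s L => (inner L).foldl (fun s i => PySem.Set.add s (f L i)) s) s ↔
      x ∈ s ∨ ∃ L ∈ outer, ∃ i ∈ inner L, x = f L i := by
  induction outer generalizing s with
  | nil => simp
  | cons a t ih =>
    simp only [List.foldl_cons, ih, mem_foldl_add, List.mem_cons]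
    constructor
    · rintro ((h | ⟨i, hi, rfl⟩) | ⟨L, hL, i, hi, rfl⟩)
      · exact Or.inl h
      · exact Or.inr ⟨a, Or.inl rfl, i, hi, rfl⟩
      · exact Or.inr ⟨L, Or.inr hL, i, hi, rfl⟩
    · rintro (h | ⟨L, (rfl | hL), i, hi, rfl⟩)
      · exact Or.inl (Or.inl h)
      · exact Or.inl (Or.inr ⟨i, hi, rfl⟩)
      · exact Or.inr ⟨L, hL, i, hi, rfl⟩

-- the substring index contains w iff w occurs in low (for w whose length is indexed)
theorem contains_subs_eq_isIn (low : String) (dictionary : List String) (w : String)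
    (hw : w ∈ dictionary) :
    PySem.Set.contains
      ((PySem.Set.ofList (dictionary.map (fun w => ((PySem.Str.len w : Int))))).foldl
        (fun s L =>
          (PySem.List.pyRange 0 ((PySem.Str.len low : Int) - L + 1) 1).foldl
            (fun s i => PySem.Set.add s (PySem.Str.slice low (some i) (some (i + L)))) s)
        PySem.Set.empty) w = PySem.Str.isIn w low := by
  have key : w ∈ ((PySem.Set.ofList (dictionary.map (fun w => ((PySem.Str.len w : Int))))).foldl
        (fun s L =>
          (PySem.List.pyRange 0 ((PySem.Str.len low : Int) - L + 1) 1).foldl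
            (fun s i => PySem.Set.add s (PySem.Str.slice low (some i) (some (i + L)))) s)
        PySem.Set.empty) ↔ PySem.Str.isIn w low = true := by
    rw [mem_foldl_nested]
    constructor
    · rintro (h | ⟨L, hL, i, hi, rfl⟩)
      · simp [PySem.Set.empty] at h
      · -- a slice of low occurs in low
        obtain ⟨w', _, hLw⟩ := List.mem_map.mp ((PySem.Set.mem_ofList _ _).mp hL)
        have hL0 : 0 ≤ L := by rw [← hLw, PySem.Str.len_eq]; positivity
        obtain ⟨hi0, _⟩ := PySem.List.mem_pyRange_one.mp hi
        rw [PySem.Str.isIn_eq]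
        apply (PySem.Chars.exists_prefix_drop_iff_isIn _ _).mp
        refine ⟨i.toNat, ?_⟩
        have hslice : (PySem.Str.slice low (some i) (some (i + L))).toList
            = List.take L.toNat (List.drop i.toNat low.toList) := by
          rw [PySem.Str.toList_slice, PySem.Chars.slice_eq_listSlice,
              show i = ((i.toNat : Nat) : Int) by omega, show L = ((L.toNat : Nat) : Int) by omega,
              PySem.List.slice_natCast_add]
          simp only [Int.toNat_natCast]
        rw [hslice]
        exact List.take_prefix _ _
    · intro hIn
      obtain ⟨pre, post, hsplit⟩ := (PySem.Str.isIn_iff_infix w low).mp hIn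
      have hlen := congrArg List.length hsplit
      simp only [List.length_append] at hlen
      refine Or.inr ⟨(PySem.Str.len w : Int), ?_, (pre.length : Int), ?_, ?_⟩
      · exact (PySem.Set.mem_ofList _ _).mpr (List.mem_map.mpr ⟨w, hw, rfl⟩)
      · rw [PySem.List.mem_pyRange_one, PySem.Str.len_eq w, PySem.Str.len_eq low]
        constructor
        · positivity
        · omega
      · symm
        apply String.toList_inj.mp
        rw [PySem.Str.toList_slice, PySem.Chars.slice_eq_listSlice, PySem.Str.len_eq,
            PySem.List.slice_natCast_add, ← hsplit, List.append_assoc, List.drop_left,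
            List.take_left]
  rw [Bool.eq_iff_iff, PySem.Set.contains_iff]
  exact key

-- label: A's if-chain equals B's table lookup
theorem label_eq (w : String) :
    (if w == "autumn" then "Fall"
     else if w == "all seasons" then "All Seasons"
     else if w == "year round" then "Year Round"
     else pvTitle w) = PySem.Dict.getD pvLabels w (pvTitle w) := by
  have hmk : pvLabels = PySem.Dict.mk [("autumn", "Fall"), ("all seasons", "All Seasons"), ("year round", "Year Round")] := by rfl
  rw [hmk]
  by_cases h1 : w = "autumn"
  · subst h1; rfl
  · by_cases h2 : w = "all seasons"
    · subst h2; rfl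
    · by_cases h3 : w = "year round"
      · subst h3; rfl
      · simp [PySem.Dict.getD_eq_get?_getD, h1, h2, h3,
              Ne.symm h1, Ne.symm h2, Ne.symm h3, PySem.Dict.get?]

-- ===== VERDICT (by name: the statement is the Claim_ definition above) =====
theorem add_label_eq (found : PySem.Set String) (w : String) :
    (if w == "autumn" then PySem.Set.add found "Fall"
     else if w == "all seasons" then PySem.Set.add found "All Seasons"
     else if w == "year round" then PySem.Set.add found "Year Round"
     else PySem.Set.add found (pvTitle w))
    = PySem.Set.add found (PySem.Dict.getD pvLabels w (pvTitle w)) := by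
  rw [← label_eq]
  by_cases h1 : w = "autumn" <;> by_cases h2 : w = "all seasons" <;>
    by_cases h3 : w = "year round" <;> simp [h1, h2, h3]

-- ===== VERDICT (by name: the statement is the Claim_ definition above) =====
theorem find_by_labels_spec : Claim_equal_find_by_labels := by
  intro text dictionary _
  unfold Spec_find_by_labels
  show find_by_labels text dictionary = find_by_labels_alt text dictionary
  simp only [find_by_labels, find_by_labels_alt]
  apply PySem.List.foldl_congr_mem'
  intro w hw acc
  rw [contains_subs_eq_isIn (PySem.Str.lower text) dictionary w hw]
  by_cases hIn : PySem.Str.isIn w (PySem.Str.lower text) = true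
  · rw [hIn]; simp only [if_true]
    exact add_label_eq acc w
  · simp only [Bool.not_eq_true] at hIn
    rw [hIn]; simp
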